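-- pv_equiv track=rewrite | github.com/KirolosMagdyGirgs/-Chaos-game-representation-of-genetic-materials | ICGR.py | encodeDNASequence
-- ===== SOURCE A (Python) =====
-- import math
--
-- def encodeDNASequence(seq):
--     A = [1, 1]
--     T = [-1, 1]
--     C = [-1, -1]
--     G = [1, -1]
--     a = 0
--     b = 0
--     x = []
--     y = []
--     n = len(seq)
--
--     if seq[0] == 'A':
--         a = int(A[0])
--         b = int(A[1])
--     elif seq[0] == 'T':
--         a = int(T[0])
--         b = int(T[1])
--     elif seq[0] == 'C':
--         a = int(C[0])
--         b = int(C[1])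
--     else:
--         a = int(G[0])
--         b = int(G[1])
--
--     x.append(a)
--     y.append(b)
--
--     for i in range(1, n):
--         if seq[i] == 'A':
--             a = int(x[i - 1]) + int(math.pow(2, i))
--             b = int(y[i - 1]) + int(math.pow(2, i))
--         elif seq[i] == 'T':
--             a = int(x[i - 1]) - int(math.pow(2, i))
--             b = int(y[i - 1]) + int(math.pow(2, i))
--         elif seq[i] == 'C':
--             a = int(x[i - 1]) - int(math.pow(2, i))
--             b = int(y[i - 1]) - int(math.pow(2, i))
--         else:
--             a = int(x[i - 1]) + int(math.pow(2, i))
--             b = int(y[i - 1]) - int(math.pow(2, i))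
--
--         x.append(a)
--         y.append(b)
--
--     x_n = int(x[n - 1])
--     y_n = int(y[n - 1])
--
--     return x_n, y_n, n
-- ===== SOURCE B (Python) =====
-- def encodeDNASequence(seq):
--     # Closed form: x_n = (2**n - 1) - 2*neg_x, y_n = (2**n - 1) - 2*neg_y,
--     # where neg_x collects the 2**i for chars that move x negative (T, C)
--     # and neg_y those that move y negative (everything but A and T).
--     neg_x = 0
--     neg_y = 0
--     for i, c in enumerate(seq):
--         if c == 'T' or c == 'C':
--             neg_x += 1 << i
--         if c != 'A' and c != 'T':
--             neg_y += 1 << i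
--     n = len(seq)
--     full = (1 << n) - 1
--     return full - 2 * neg_x, full - 2 * neg_y, n
-- ===== Notes on version B (the rewrite author's own statement) =====
-- stated objective: simpler
-- what changed: Replaces A's list-building running-coordinate loop (with math.pow and repeated x[i-1]/y[i-1] indexing) by one pass accumulating two sign-bit sums and a closed-form final answer (2^n-1) - 2*neg.
import Mathlib
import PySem

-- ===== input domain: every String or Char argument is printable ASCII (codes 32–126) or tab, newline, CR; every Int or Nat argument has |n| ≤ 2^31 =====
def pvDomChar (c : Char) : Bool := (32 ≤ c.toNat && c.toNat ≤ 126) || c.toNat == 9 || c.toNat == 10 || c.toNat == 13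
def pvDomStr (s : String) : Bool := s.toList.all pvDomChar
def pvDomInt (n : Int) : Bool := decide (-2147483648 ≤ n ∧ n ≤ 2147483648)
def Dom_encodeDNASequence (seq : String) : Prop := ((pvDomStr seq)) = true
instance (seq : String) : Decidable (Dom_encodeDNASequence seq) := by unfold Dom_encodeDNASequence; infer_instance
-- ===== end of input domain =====

-- B replaces A's list-building running-coordinate loop by a one-pass sign-bit sum and the
-- closed form (2^n - 1) - 2*neg (simpler; return-value equivalence, no mutation involved).

-- ===== PORT A =====
def encodeDNASequence (seq : String) : Int × Int × Int :=
  let cs := seq.toList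
  let n : Int := cs.length
  match cs with
  | [] => (0, 0, 0)  -- Python raises IndexError at seq[0]; excluded by Pre_
  | c0 :: _ =>
    let a0 : Int := if c0 = 'A' then 1 else if c0 = 'T' then -1 else if c0 = 'C' then -1 else 1
    let b0 : Int := if c0 = 'A' then 1 else if c0 = 'T' then 1 else if c0 = 'C' then -1 else -1
    let st := (PySem.List.pyRange 1 n 1).foldl (fun (st : List Int × List Int) (i : Int) =>
      let xp := PySem.List.pyGetD st.1 (i - 1) 0
      let yp := PySem.List.pyGetD st.2 (i - 1) 0
      let p : Int := 2 ^ i.toNat  -- int(math.pow(2, i)): exact for the exponents Pre_ admits (i ≤ 1023)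
      let c := PySem.List.pyGetD cs i ' '  -- seq[i], always in range here
      let ab : Int × Int :=
        if c = 'A' then (xp + p, yp + p)
        else if c = 'T' then (xp - p, yp + p)
        else if c = 'C' then (xp - p, yp - p)
        else (xp + p, yp - p)
      (st.1 ++ [ab.1], st.2 ++ [ab.2])) ([a0], [b0])
    (PySem.List.pyGetD st.1 (n - 1) 0, PySem.List.pyGetD st.2 (n - 1) 0, n)

-- ===== PORT B =====
def encodeDNASequence_alt (seq : String) : Int × Int × Int :=
  let cs := seq.toList
  let neg := (PySem.List.enumerate cs 0).foldl
    (fun (st : Int × Int) (p : Int × Char) =>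
      ((if p.2 = 'T' ∨ p.2 = 'C' then st.1 + 2 ^ p.1.toNat else st.1),
       (if p.2 ≠ 'A' ∧ p.2 ≠ 'T' then st.2 + 2 ^ p.1.toNat else st.2)))
    (0, 0)
  let n : Int := cs.length
  let full : Int := 2 ^ cs.length - 1
  (full - 2 * neg.1, full - 2 * neg.2, n)

-- ===== PRECONDITION & SPEC =====
-- Pre_ excludes exactly the inputs where A raises: the empty string (IndexError at seq[0])
-- and strings of length ≥ 1025 (OverflowError: math.pow(2, i) overflows for i ≥ 1024).
def Pre_encodeDNASequence (seq : String) : Prop :=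
  1 ≤ PySem.Str.len seq ∧ PySem.Str.len seq ≤ 1024
instance (seq : String) : Decidable (Pre_encodeDNASequence seq) := by
  unfold Pre_encodeDNASequence; infer_instance
def pvWitness_encodeDNASequence : String := "ACGT"

def Spec_encodeDNASequence (seq : String) (out : Int × Int × Int) : Prop := out = encodeDNASequence_alt seq
instance (seq : String) (out : Int × Int × Int) : Decidable (Spec_encodeDNASequence seq out) := by unfold Spec_encodeDNASequence; infer_instance

-- ===== CLAIM (what is proved, stated in full; the proofs are below) =====
def Claim_equal_encodeDNASequence : Prop := ∀ (seq : String), Dom_encodeDNASequence seq → Pre_encodeDNASequence seq → Spec_encodeDNASequence seq (encodeDNASequence seq)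

-- ===== LEMMAS AND PROOFS =====

-- per-character x/y signs of A's chaos-game step
def sgnX (c : Char) : Int := if c = 'A' then 1 else if c = 'T' then -1 else if c = 'C' then -1 else 1
def sgnY (c : Char) : Int := if c = 'A' then 1 else if c = 'T' then 1 else if c = 'C' then -1 else -1

-- prefix sums Σ_{i<m} sgn(cs[i]) * 2^i (A's running coordinate after m characters)
def SX (cs : List Char) (m : Nat) : Int := ∑ i ∈ Finset.range m, sgnX (cs.getD i ' ') * 2 ^ i
def SY (cs : List Char) (m : Nat) : Int := ∑ i ∈ Finset.range m, sgnY (cs.getD i ' ') * 2 ^ i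

def NX : List Char → Int
| [] => 0
| c :: t => (if c = 'T' ∨ c = 'C' then 1 else 0) + 2 * NX t

def NY : List Char → Int
| [] => 0
| c :: t => (if c ≠ 'A' ∧ c ≠ 'T' then 1 else 0) + 2 * NY t

theorem bloop (cs : List Char) : ∀ (s : Nat) (nx ny : Int),
    (PySem.List.enumerate cs (s : Int)).foldl
      (fun (st : Int × Int) (p : Int × Char) =>
        ((if p.2 = 'T' ∨ p.2 = 'C' then st.1 + 2 ^ p.1.toNat else st.1),
         (if p.2 ≠ 'A' ∧ p.2 ≠ 'T' then st.2 + 2 ^ p.1.toNat else st.2)))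
      (nx, ny)
    = (nx + 2 ^ s * NX cs, ny + 2 ^ s * NY cs) := by
  induction cs with
  | nil => intro s nx ny; simp [PySem.List.enumerate_nil, NX, NY]
  | cons c t ih =>
    intro s nx ny
    rw [PySem.List.enumerate_cons]
    simp only [List.foldl_cons]
    have hs : (s : Int) + 1 = ((s + 1 : Nat) : Int) := by push_cast; ring
    rw [hs, ih (s + 1)]
    simp only [Int.toNat_natCast, NX, NY]
    refine Prod.ext ?_ ?_ <;> simp only [] <;> split_ifs <;> ring


-- ===== VERDICT (by name: the statement is the Claim_ definition above) =====

theorem sgnX_eq (c : Char) : sgnX c = 1 - 2 * (if c = 'T' ∨ c = 'C' then 1 else 0) := by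
  unfold sgnX; split_ifs <;> simp_all

theorem sgnY_eq (c : Char) : sgnY c = 1 - 2 * (if c ≠ 'A' ∧ c ≠ 'T' then 1 else 0) := by
  unfold sgnY; split_ifs <;> simp_all

theorem SX_cons (c : Char) (t : List Char) (n : Nat) :
    SX (c :: t) (n + 1) = sgnX c + 2 * SX t n := by
  unfold SX
  rw [Finset.sum_range_succ']
  simp only [List.getD_cons_succ, List.getD_cons_zero, pow_zero, mul_one, pow_succ]
  have h : ∀ i ∈ Finset.range n,
      sgnX (t.getD i ' ') * (2 ^ i * 2) = 2 * (sgnX (t.getD i ' ') * 2 ^ i) := by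
    intro i _; ring
  rw [Finset.sum_congr rfl h, ← Finset.mul_sum]
  ring

theorem SY_cons (c : Char) (t : List Char) (n : Nat) :
    SY (c :: t) (n + 1) = sgnY c + 2 * SY t n := by
  unfold SY
  rw [Finset.sum_range_succ']
  simp only [List.getD_cons_succ, List.getD_cons_zero, pow_zero, mul_one, pow_succ]
  have h : ∀ i ∈ Finset.range n,
      sgnY (t.getD i ' ') * (2 ^ i * 2) = 2 * (sgnY (t.getD i ' ') * 2 ^ i) := by
    intro i _; ring
  rw [Finset.sum_congr rfl h, ← Finset.mul_sum]
  ring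

theorem SX_closed : ∀ cs : List Char, SX cs cs.length = 2 ^ cs.length - 1 - 2 * NX cs := by
  intro cs
  induction cs with
  | nil => simp [SX, NX]
  | cons c t ih =>
    show SX (c :: t) (t.length + 1) = _
    rw [SX_cons, ih, sgnX_eq]
    rw [show NX (c :: t) = (if c = 'T' ∨ c = 'C' then 1 else 0) + 2 * NX t from rfl]
    simp only [List.length_cons, pow_succ]
    split_ifs <;> ring

theorem SY_closed : ∀ cs : List Char, SY cs cs.length = 2 ^ cs.length - 1 - 2 * NY cs := by
  intro cs
  induction cs with
  | nil => simp [SY, NY]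
  | cons c t ih =>
    show SY (c :: t) (t.length + 1) = _
    rw [SY_cons, ih, sgnY_eq]
    rw [show NY (c :: t) = (if c ≠ 'A' ∧ c ≠ 'T' then 1 else 0) + 2 * NY t from rfl]
    simp only [List.length_cons, pow_succ]
    split_ifs <;> ring

theorem aloop (cs : List Char) (m : Nat) (h1 : 1 ≤ m) (h2 : m ≤ cs.length) :
    (PySem.List.pyRange 1 (m : Int) 1).foldl
      (fun (st : List Int × List Int) (i : Int) =>
        let xp := PySem.List.pyGetD st.1 (i - 1) 0
        let yp := PySem.List.pyGetD st.2 (i - 1) 0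
        let p : Int := 2 ^ i.toNat
        let c := PySem.List.pyGetD cs i ' '
        let ab : Int × Int :=
          if c = 'A' then (xp + p, yp + p)
          else if c = 'T' then (xp - p, yp + p)
          else if c = 'C' then (xp - p, yp - p)
          else (xp + p, yp - p)
        (st.1 ++ [ab.1], st.2 ++ [ab.2]))
      ([sgnX (cs.getD 0 ' ')], [sgnY (cs.getD 0 ' ')])
    = ((List.range m).map (fun k => SX cs (k + 1)),
       (List.range m).map (fun k => SY cs (k + 1))) := by
  induction m with
  | zero => omega
  | succ m ih =>
    by_cases hm : m = 0
    · subst hm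
      rw [show ((1 : Nat) : Int) = 1 from rfl, PySem.List.pyRange_one_eq_nil le_rfl]
      simp [SX, SY]
    · have hm1 : 1 ≤ m := by omega
      rw [show ((m + 1 : Nat) : Int) = (m : Int) + 1 by push_cast; ring,
          PySem.List.pyRange_one_succ_right (by exact_mod_cast hm1), List.foldl_append,
          ih hm1 (by omega)]
      simp only [List.foldl_cons, List.foldl_nil]
      have hidx : (m : Int) - 1 = ((m - 1 : Nat) : Int) := by omega
      rw [hidx]
      simp only [PySem.List.pyGetD_natCast, Int.toNat_natCast]
      rw [PySem.List.getD_map_range _ m (m - 1) _ (by omega),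
          PySem.List.getD_map_range _ m (m - 1) _ (by omega),
          show m - 1 + 1 = m by omega]
      have hX : SX cs (m + 1) = SX cs m + sgnX (cs.getD m ' ') * 2 ^ m := by
        unfold SX; rw [Finset.sum_range_succ]
      have hY : SY cs (m + 1) = SY cs m + sgnY (cs.getD m ' ') * 2 ^ m := by
        unfold SY; rw [Finset.sum_range_succ]
      rw [List.range_succ, List.map_append, List.map_append]
      simp only [List.map_cons, List.map_nil]
      rw [hX, hY]
      unfold sgnX sgnY
      split_ifs <;> first
        | (simp [Prod.ext_iff]; done)
        | (simp [Prod.ext_iff]; constructor <;> ring)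

theorem encodeDNASequence_spec : Claim_equal_encodeDNASequence := by
  intro seq _ hp
  obtain ⟨h1, -⟩ := hp
  have hne : seq.toList ≠ [] := by
    intro h
    rw [PySem.Str.len_eq, h] at h1
    simp at h1
  unfold Spec_encodeDNASequence encodeDNASequence encodeDNASequence_alt
  rcases hcs : seq.toList with - | ⟨c0, rest⟩
  · exact absurd hcs hne
  · simp only []
    have hA := aloop (c0 :: rest) (c0 :: rest).length (by simp) le_rfl
    simp only [List.getD_cons_zero] at hA
    rw [show (if c0 = 'A' then (1 : Int) else if c0 = 'T' then -1 else if c0 = 'C' then -1 else 1)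
          = sgnX c0 from rfl,
        show (if c0 = 'A' then (1 : Int) else if c0 = 'T' then 1 else if c0 = 'C' then -1 else -1)
          = sgnY c0 from rfl,
        hA]
    have hB := bloop (c0 :: rest) 0 0 0
    rw [Nat.cast_zero] at hB
    simp only [pow_zero, one_mul, zero_add] at hB
    rw [hB]
    simp only [List.length_cons]
    rw [show (((rest.length + 1 : Nat) : Int) - 1) = ((rest.length + 1 - 1 : Nat) : Int) by omega,
        PySem.List.pyGetD_natCast, PySem.List.pyGetD_natCast,
        PySem.List.getD_map_range _ _ _ _ (by omega), PySem.List.getD_map_range _ _ _ _ (by omega),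
        show rest.length + 1 - 1 + 1 = rest.length + 1 by omega]
    rw [show rest.length + 1 = (c0 :: rest).length from rfl, SX_closed, SY_closed]
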